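-- pv_equiv track=rewrite | github.com/yousefkotp/8-Puzzle-Solver | GUI/interface.py | validateState
-- ===== SOURCE A (Python) =====
-- def validateState(inputState):
--     """
--     Validates given state
--     :param inputState: String representation of state to be validated
--     :return: boolean
--     """
--     seen = []
--     if inputState is None or len(inputState) != 9 or not inputState.isnumeric():
--         return False
--     for dig in inputState:
--         if dig in seen or dig == '9':
--             return False
--         seen.append(dig)
--     return True
-- ===== SOURCE B (Python) =====
-- def validateState(inputState):
--     """
--     Validates given state
--     :param inputState: String representation of state to be validated
--     :return: boolean
--     """
--     if inputState is None or len(inputState) != 9 or not inputState.isnumeric():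
--         return False
--     ordered = sorted(inputState)
--     return '9' not in ordered and all(a != b for a, b in zip(ordered, ordered[1:]))
-- ===== Notes on version B (the rewrite author's own statement) =====
-- stated objective: alternative
-- what changed: Replaces A's single scan with an incrementally grown seen-list (quadratic membership tests, early return) by a sort-then-scan: sort the characters once, then duplicates can only be adjacent, so distinctness is one zip over consecutive pairs.
import Mathlib
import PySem

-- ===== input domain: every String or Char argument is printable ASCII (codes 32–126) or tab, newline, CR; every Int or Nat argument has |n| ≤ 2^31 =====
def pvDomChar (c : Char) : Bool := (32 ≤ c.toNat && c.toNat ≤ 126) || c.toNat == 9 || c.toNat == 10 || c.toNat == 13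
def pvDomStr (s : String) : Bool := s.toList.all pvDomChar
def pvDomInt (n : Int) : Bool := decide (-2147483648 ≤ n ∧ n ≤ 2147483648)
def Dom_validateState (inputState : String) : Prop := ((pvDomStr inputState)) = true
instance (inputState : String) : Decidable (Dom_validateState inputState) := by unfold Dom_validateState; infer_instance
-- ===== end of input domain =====

-- B replaces A's seen-list scan by sort-then-scan: sort the characters, then duplicates
-- are adjacent, so one pass over consecutive pairs decides distinctness — objective: alternative.


-- ===== PORT A =====
-- `inputState.isnumeric()` is ported as PySem.Str.strIsdigit: exact on the ASCII input
-- domain (Dom), where the numeric characters are exactly '0'..'9'.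
-- The for-loop with early return and the growing `seen` list:
def validateStateLoop : List Char → List Char → Bool
  | [], _ => true
  | d :: rest, seen =>
      if seen.contains d || d == '9' then false
      else validateStateLoop rest (seen ++ [d])

def validateState (inputState : String) : Bool :=
  if PySem.Str.len inputState != 9 || !PySem.Str.strIsdigit inputState then false
  else validateStateLoop inputState.toList []

-- ===== PORT B =====
-- `sorted(inputState)` is PySem.List.sorted over the characters; `'9' not in ordered`
-- is character membership; `zip(ordered, ordered[1:])` is List.zip with slice [1:].
def validateState_alt (inputState : String) : Bool :=
  if PySem.Str.len inputState != 9 || !PySem.Str.strIsdigit inputState then false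
  else
    let ordered := PySem.List.sorted inputState.toList (fun c => c) false
    !ordered.contains '9'
      && (ordered.zip (PySem.List.slice ordered (some 1) none)).all (fun p => p.1 != p.2)

-- ===== PRECONDITION & SPEC =====
def Spec_validateState (inputState : String) (out : Bool) : Prop := out = validateState_alt inputState
instance (inputState : String) (out : Bool) : Decidable (Spec_validateState inputState out) := by unfold Spec_validateState; infer_instance

-- ===== CLAIM (what is proved, stated in full; the proofs are below) =====
def Claim_equal_validateState : Prop := ∀ (inputState : String), Dom_validateState inputState → Spec_validateState inputState (validateState inputState)

-- ===== LEMMAS AND PROOFS =====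

-- A's loop returns true iff no '9' occurs, the characters are pairwise distinct,
-- and none of them is already in `seen`.
theorem validateStateLoop_spec (cs seen : List Char) :
    validateStateLoop cs seen
      = decide (('9' ∉ cs) ∧ cs.Nodup ∧ ∀ c ∈ cs, c ∉ seen) := by
  induction cs generalizing seen with
  | nil => simp [validateStateLoop]
  | cons d rest ih =>
    simp only [validateStateLoop]
    by_cases h : (seen.contains d || d == '9') = true
    · rw [if_pos h]
      rcases Bool.or_eq_true_iff.1 h with h' | h'
      · have hd : d ∈ seen := by simpa using h'
        symm
        simp only [decide_eq_false_iff_not]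
        rintro ⟨-, -, hall⟩
        exact hall d List.mem_cons_self hd
      · have : d = '9' := by simpa using h'
        subst this
        simp
    · rw [if_neg h, ih]
      simp only [Bool.or_eq_true_iff, not_or, List.contains_eq_mem,
        decide_eq_true_eq, beq_iff_eq] at h
      obtain ⟨hseen, hd9⟩ := h
      simp only [decide_eq_decide, List.mem_cons, List.nodup_cons,
        List.mem_append, not_or]
      constructor
      · rintro ⟨h9, hnd, hall⟩
        exact ⟨⟨fun hc => hd9 hc.symm, h9⟩,
          ⟨fun hdr => (hall d hdr).2.1 rfl, hnd⟩,
          fun c hc => hc.elim (fun e => e ▸ hseen) (fun hcr => (hall c hcr).1)⟩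
      · rintro ⟨⟨-, h9⟩, ⟨hdnr, hnd⟩, hall⟩
        exact ⟨h9, hnd, fun c hc => ⟨hall c (Or.inr hc),
          fun e => hdnr (e ▸ hc), List.not_mem_nil⟩⟩

-- the adjacent-pair pass over the zip is exactly IsChain (· ≠ ·)
theorem zip_tail_all_ne (l : List Char) :
    ((l.zip l.tail).all (fun p => p.1 != p.2)) = decide (l.IsChain (· ≠ ·)) := by
  induction l with
  | nil => simp
  | cons a t ih =>
    cases t with
    | nil => simp
    | cons b u =>
      simp only [List.tail_cons] at ih ⊢
      rw [List.zip_cons_cons, List.all_cons, ih]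
      by_cases hab : a = b <;> simp [List.isChain_cons_cons, hab]

-- on a (≤)-sorted list, adjacent distinctness is exactly Nodup
theorem chain'_ne_iff_nodup_of_pairwise_le (l : List Char)
    (hle : l.Pairwise (· ≤ ·)) : l.IsChain (· ≠ ·) ↔ l.Nodup := by
  constructor
  · intro hne
    have hlt : l.IsChain (· < ·) := by
      have hch : l.IsChain (· ≤ ·) := hle.isChain
      rw [List.isChain_iff_getElem] at hch hne ⊢
      intro i hi
      exact lt_of_le_of_ne (hch i hi) (hne i hi)
    exact hlt.pairwise.imp ne_of_lt
  · intro hnd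
    exact hnd.isChain

-- ===== VERDICT (by name: the statement is the Claim_ definition above) =====
theorem validateState_spec : Claim_equal_validateState := by
  intro s _
  unfold Spec_validateState validateState validateState_alt
  by_cases hg : (PySem.Str.len s != 9 || !PySem.Str.strIsdigit s) = true
  · rw [if_pos hg, if_pos hg]
  · rw [if_neg hg, if_neg hg]
    rw [validateStateLoop_spec]
    simp only [PySem.List.slice_from_one]
    rw [zip_tail_all_ne]
    set t := PySem.List.sorted s.toList (fun c => c) false with ht
    have hperm : t.Perm s.toList := PySem.List.sorted_perm _ _ _
    have hle : t.Pairwise (· ≤ ·) := PySem.List.sorted_pairwise _ _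
    have h9 : ('9' ∈ t) ↔ ('9' ∈ s.toList) := hperm.mem_iff
    have hnd : t.IsChain (· ≠ ·) ↔ s.toList.Nodup :=
      (chain'_ne_iff_nodup_of_pairwise_le t hle).trans hperm.nodup_iff
    by_cases h9m : '9' ∈ s.toList <;> by_cases hndm : s.toList.Nodup <;>
      simp [List.contains_eq_mem, h9, hnd, h9m, hndm]
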